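-- pv_equiv track=rewrite | github.com/uewekenuewe/Advent-Of-Code | 2015/day08/day08.py | part2
-- ===== SOURCE A (Python) =====
-- def part2(l:str):
--     result = 2
--     i = 0
--     while(i < len(l)):
--         if l[i] == '"':
--             result += 2
--         elif l[i] == '\\':
--             result += 2
--         else:
--             result += 1
--         i+=1
--     return result
-- ===== SOURCE B (Python) =====
-- def part2(l: str):
--     # closed form: base 2, every char counts 1, quotes and backslashes count 1 extra
--     return 2 + len(l) + l.count('"') + l.count('\\')
-- ===== Notes on version B (the rewrite author's own statement) =====
-- stated objective: simpler
-- what changed: Replaces the character-by-character while loop and its branch chain with an arithmetic closed form: base 2 plus the string length plus the counts of quote and backslash characters.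
import Mathlib
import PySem

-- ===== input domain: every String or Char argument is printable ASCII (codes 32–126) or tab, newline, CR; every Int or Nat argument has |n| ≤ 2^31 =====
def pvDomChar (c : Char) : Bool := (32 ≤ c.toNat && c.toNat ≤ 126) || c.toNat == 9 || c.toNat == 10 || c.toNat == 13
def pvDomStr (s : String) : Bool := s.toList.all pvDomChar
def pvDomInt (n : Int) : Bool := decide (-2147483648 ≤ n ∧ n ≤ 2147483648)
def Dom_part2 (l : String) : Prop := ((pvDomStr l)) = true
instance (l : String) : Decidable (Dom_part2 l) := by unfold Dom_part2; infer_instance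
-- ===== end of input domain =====

-- B replaces A's while loop with a closed arithmetic formula (simpler; same O(n) cost).

-- ===== PORT A =====
-- A's while loop walks the characters in order, adding 2 for '"' or '\' and 1 otherwise,
-- starting from result = 2; ported as structural recursion over the character list.
def part2Loop (cs : List Char) (result : Int) : Int :=
  match cs with
  | [] => result
  | c :: t =>
    if c = '"' then part2Loop t (result + 2)
    else if c = '\\' then part2Loop t (result + 2)
    else part2Loop t (result + 1)

def part2 (l : String) : Int := part2Loop l.toList 2

-- ===== PORT B =====
def part2_alt (l : String) : Int :=
  2 + (PySem.Str.len l : Int) + (PySem.Str.count l "\"" : Int) + (PySem.Str.count l "\\" : Int)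

-- ===== PRECONDITION & SPEC =====
def Spec_part2 (l : String) (out : Int) : Prop := out = part2_alt l
instance (l : String) (out : Int) : Decidable (Spec_part2 l out) := by unfold Spec_part2; infer_instance

-- ===== CLAIM (what is proved, stated in full; the proofs are below) =====
def Claim_equal_part2 : Prop := ∀ (l : String), Dom_part2 l → Spec_part2 l (part2 l)

-- ===== LEMMAS AND PROOFS =====

-- Chars.count of a single-character pattern is List.count
theorem count_go_singleton (c : Char) (cs : List Char) (fuel : Nat) (acc : Nat)
    (h : cs.length ≤ fuel) :
    PySem.Chars.count.go [c] fuel cs acc = acc + cs.count c := by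
  induction cs generalizing fuel acc with
  | nil => cases fuel <;> simp [PySem.Chars.count.go]
  | cons x t ih =>
    cases fuel with
    | zero => simp at h
    | succ f =>
      simp only [List.length_cons, Nat.succ_le_succ_iff] at h
      by_cases hx : x = c
      · subst hx
        have hpre : [x].isPrefixOf (x :: t) = true := by simp [List.isPrefixOf]
        simp only [PySem.Chars.count.go, hpre, if_pos]
        simp only [List.length_singleton, List.drop_succ_cons, List.drop_zero]
        rw [ih f (acc + 1) h]
        simp
        omega
      · have hpre : [c].isPrefixOf (x :: t) = false := by
          simp [List.isPrefixOf]
          exact fun hh => (hx hh.symm).elim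
        simp only [PySem.Chars.count.go, hpre]
        simp only [Bool.false_eq_true, if_false]
        rw [ih f acc h]
        simp [hx]

theorem chars_count_singleton (c : Char) (cs : List Char) :
    PySem.Chars.count cs [c] = cs.count c := by
  simp [PySem.Chars.count, count_go_singleton c cs cs.length 0 (le_refl _)]

theorem part2Loop_eq (cs : List Char) (r : Int) :
    part2Loop cs r = r + cs.length + cs.count '"' + cs.count '\\' := by
  induction cs generalizing r with
  | nil => simp [part2Loop]
  | cons x t ih =>
    by_cases h1 : x = '"'
    · subst h1
      simp only [part2Loop, ih]
      simp
      ring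
    · by_cases h2 : x = '\\'
      · subst h2
        simp only [part2Loop, if_neg h1, ih]
        simp [h1]
        ring
      · simp only [part2Loop, if_neg h1, if_neg h2, ih]
        simp [h1, h2]
        ring

-- ===== VERDICT (by name: the statement is the Claim_ definition above) =====
theorem part2_spec : Claim_equal_part2 := by
  intro l _
  unfold Spec_part2 part2 part2_alt
  rw [part2Loop_eq]
  have h1 : PySem.Str.count l "\"" = l.toList.count '"' := by
    rw [PySem.Str.count_eq]
    exact chars_count_singleton _ _
  have h2 : PySem.Str.count l "\\" = l.toList.count '\\' := by
    rw [PySem.Str.count_eq]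
    exact chars_count_singleton _ _
  rw [h1, h2, PySem.Str.len_eq]
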